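-- pv_equiv track=rewrite | github.com/Sheriffy4/intellirefactor | intellirefactor/analysis/refactor/expert/analyzers/duplicate_analyzer.py | _suggest_extraction
-- ===== SOURCE A (Python) =====
-- def _suggest_extraction(content: str, occurrence_count: int) -> str:
--     """Suggest how to extract the duplicate code."""
--     lines = content.split('\n')
--
--     # Analyze the content to suggest extraction strategy
--     if any('def ' in line for line in lines):
--         return f"Extract method (appears {occurrence_count} times)"
--     elif any('class ' in line for line in lines):
--         return f"Extract class or refactor inheritance (appears {occurrence_count} times)"
--     elif any('import ' in line or 'from ' in line for line in lines):
--         return f"Consolidate imports (appears {occurrence_count} times)"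
--     elif len(lines) > 10:
--         return f"Extract large code block into method (appears {occurrence_count} times)"
--     else:
--         return f"Extract common code pattern (appears {occurrence_count} times)"
-- ===== SOURCE B (Python) =====
-- def _suggest_extraction(content: str, occurrence_count: int) -> str:
--     """Suggest how to extract the duplicate code."""
--     # Single pass over the lines: accumulate three feature flags and the line
--     # count in one loop, then pick the message by the same priority order.
--     has_def = has_class = has_import = False
--     n = 0
--     for line in content.split('\n'):
--         n += 1
--         if 'def ' in line:
--             has_def = True
--         if 'class ' in line:
--             has_class = True
--         if 'import ' in line or 'from ' in line:
--             has_import = True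
--     if has_def:
--         what = "Extract method"
--     elif has_class:
--         what = "Extract class or refactor inheritance"
--     elif has_import:
--         what = "Consolidate imports"
--     elif n > 10:
--         what = "Extract large code block into method"
--     else:
--         what = "Extract common code pattern"
--     return f"{what} (appears {occurrence_count} times)"
-- ===== Notes on version B (the rewrite author's own statement) =====
-- stated objective: alternative
-- what changed: B replaces A's four independent any(...) rescans of the line list by a single pass that accumulates three feature booleans and the line count, followed by one priority decision over the accumulated flags.
import Mathlib
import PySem

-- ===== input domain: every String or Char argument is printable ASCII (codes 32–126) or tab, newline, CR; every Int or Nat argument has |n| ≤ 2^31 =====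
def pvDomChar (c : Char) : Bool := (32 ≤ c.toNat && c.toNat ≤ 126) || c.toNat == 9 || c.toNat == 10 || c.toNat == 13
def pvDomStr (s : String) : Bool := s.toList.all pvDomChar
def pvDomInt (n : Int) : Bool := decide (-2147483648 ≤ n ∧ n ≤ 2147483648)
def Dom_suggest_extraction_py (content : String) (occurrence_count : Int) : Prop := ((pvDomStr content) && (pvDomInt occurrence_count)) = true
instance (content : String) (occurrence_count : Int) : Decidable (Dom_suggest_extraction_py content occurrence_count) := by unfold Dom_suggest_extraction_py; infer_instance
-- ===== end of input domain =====

-- B replaces A's four independent any(...) rescans of the line list by one accumulating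
-- pass (three feature flags plus a line counter) followed by a single priority decision.

-- ===== PORT A =====
def suggest_extraction_py (content : String) (occurrence_count : Int) : String :=
  let lines := (PySem.Str.split? content "\n").getD []
  if lines.any (fun line => PySem.Str.isIn "def " line) then
    "Extract method (appears " ++ PySem.Int.toStr occurrence_count ++ " times)"
  else if lines.any (fun line => PySem.Str.isIn "class " line) then
    "Extract class or refactor inheritance (appears " ++ PySem.Int.toStr occurrence_count ++ " times)"
  else if lines.any (fun line => PySem.Str.isIn "import " line || PySem.Str.isIn "from " line) then
    "Consolidate imports (appears " ++ PySem.Int.toStr occurrence_count ++ " times)"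
  else if (lines.length : Int) > 10 then
    "Extract large code block into method (appears " ++ PySem.Int.toStr occurrence_count ++ " times)"
  else
    "Extract common code pattern (appears " ++ PySem.Int.toStr occurrence_count ++ " times)"

-- ===== PORT B =====
-- loop body of Source B's single pass: flags (has_def, has_class, has_import) and line count n
def pvScanStep (st : Bool × Bool × Bool × Int) (line : String) : Bool × Bool × Bool × Int :=
  let n := st.2.2.2 + 1
  let hd := if PySem.Str.isIn "def " line then true else st.1
  let hc := if PySem.Str.isIn "class " line then true else st.2.1
  let hi := if PySem.Str.isIn "import " line || PySem.Str.isIn "from " line then true else st.2.2.1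
  (hd, hc, hi, n)

def suggest_extraction_py_alt (content : String) (occurrence_count : Int) : String :=
  let st := (((PySem.Str.split? content "\n").getD []).foldl pvScanStep (false, false, false, 0))
  let what :=
    if st.1 then "Extract method"
    else if st.2.1 then "Extract class or refactor inheritance"
    else if st.2.2.1 then "Consolidate imports"
    else if st.2.2.2 > 10 then "Extract large code block into method"
    else "Extract common code pattern"
  what ++ " (appears " ++ PySem.Int.toStr occurrence_count ++ " times)"

-- ===== PRECONDITION & SPEC =====
def Spec_suggest_extraction_py (content : String) (occurrence_count : Int) (out : String) : Prop := out = suggest_extraction_py_alt content occurrence_count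
instance (content : String) (occurrence_count : Int) (out : String) : Decidable (Spec_suggest_extraction_py content occurrence_count out) := by unfold Spec_suggest_extraction_py; infer_instance

-- ===== CLAIM (what is proved, stated in full; the proofs are below) =====
def Claim_equal_suggest_extraction_py : Prop := ∀ (content : String) (occurrence_count : Int), Dom_suggest_extraction_py content occurrence_count → Spec_suggest_extraction_py content occurrence_count (suggest_extraction_py content occurrence_count)

-- ===== LEMMAS AND PROOFS =====

theorem pvScanStep_foldl (lines : List String) (a b c : Bool) (n : Int) :
    lines.foldl pvScanStep (a, b, c, n)
      = (a || lines.any (fun l => PySem.Str.isIn "def " l),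
         b || lines.any (fun l => PySem.Str.isIn "class " l),
         c || lines.any (fun l => PySem.Str.isIn "import " l || PySem.Str.isIn "from " l),
         n + lines.length) := by
  induction lines generalizing a b c n with
  | nil => simp
  | cons x t ih =>
    simp only [List.foldl_cons, List.any_cons, List.length_cons]
    rw [pvScanStep, ih]
    congr 1
    · split <;> simp_all
    congr 1
    · split <;> simp_all
    congr 1
    · split <;> simp_all
    · push_cast; ring

-- ===== VERDICT (by name: the statement is the Claim_ definition above) =====
theorem suggest_extraction_py_spec : Claim_equal_suggest_extraction_py := by
  intro content n _
  unfold Spec_suggest_extraction_py suggest_extraction_py suggest_extraction_py_alt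
  rw [pvScanStep_foldl]
  dsimp only
  simp only [Bool.false_or, Int.zero_add]
  split_ifs <;> rfl
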